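-- pv_equiv track=rewrite | github.com/sutazai/sutazaiapp | core_system/system_optimization_manager.py | _replace_quantum_references
-- ===== SOURCE A (Python) =====
-- def _replace_quantum_references(content: str) -> str:
--     """Replace Quantum references with SutazAi"""
--     replacements = [
--         ("Quantum", "SutazAi"),
--         ("quantum", "sutazai"),
--         ("QUANTUM", "SUTAZAI"),
--     ]
--
--     for old, new in replacements:
--         content = content.replace(old, new)
--
--     return content
-- ===== SOURCE B (Python) =====
-- def _replace_quantum_references(content: str) -> str:
--     """Replace Quantum references with SutazAi in a single left-to-right scan."""
--     out = []
--     i = 0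
--     n = len(content)
--     while i < n:
--         if content.startswith("Quantum", i):
--             out.append("SutazAi")
--             i += 7
--         elif content.startswith("quantum", i):
--             out.append("sutazai")
--             i += 7
--         elif content.startswith("QUANTUM", i):
--             out.append("SUTAZAI")
--             i += 7
--         else:
--             out.append(content[i])
--             i += 1
--     return "".join(out)
-- ===== Notes on version B (the rewrite author's own statement) =====
-- stated objective: alternative
-- what changed: One single left-to-right scan matching all three case variants at each position and emitting pieces into a join, instead of three sequential full-string .replace passes; the three patterns never overlap each other and no replacement can create or destroy a later match, so one pass equals the three ordered passes.
import Mathlib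
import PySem

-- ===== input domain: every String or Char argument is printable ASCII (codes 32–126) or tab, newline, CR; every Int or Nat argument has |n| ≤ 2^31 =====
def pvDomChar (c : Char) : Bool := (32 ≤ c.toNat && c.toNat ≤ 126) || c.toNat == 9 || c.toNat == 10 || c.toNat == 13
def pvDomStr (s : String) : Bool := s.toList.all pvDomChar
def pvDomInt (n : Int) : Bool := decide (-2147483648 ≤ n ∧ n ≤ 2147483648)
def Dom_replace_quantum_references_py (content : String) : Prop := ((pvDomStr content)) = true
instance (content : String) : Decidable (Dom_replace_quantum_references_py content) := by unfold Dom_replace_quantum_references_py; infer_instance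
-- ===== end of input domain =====

-- B replaces A's three sequential full-string .replace passes by one left-to-right scan that
-- matches all three case variants at each position (alternative decomposition, same cost).


-- ===== PORT A =====
-- literal transliteration: the list of (old, new) pairs, folded through str.replace
def replace_quantum_references_py (content : String) : String :=
  let replacements : List (String × String) :=
    [("Quantum", "SutazAi"), ("quantum", "sutazai"), ("QUANTUM", "SUTAZAI")]
  replacements.foldl (fun c on => PySem.Str.replace c on.1 on.2) content

-- ===== PORT B =====
-- B's single scan over the characters: at each position try the three 7-char patterns
-- (content.startswith(pat, i)), else copy one character
def pvScanB : List Char → List Char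
  | [] => []
  | c :: t =>
    if "Quantum".toList.isPrefixOf (c :: t) then "SutazAi".toList ++ pvScanB (t.drop 6)
    else if "quantum".toList.isPrefixOf (c :: t) then "sutazai".toList ++ pvScanB (t.drop 6)
    else if "QUANTUM".toList.isPrefixOf (c :: t) then "SUTAZAI".toList ++ pvScanB (t.drop 6)
    else c :: pvScanB t
termination_by l => l.length
decreasing_by all_goals (simp [List.length_drop]; try omega)

def replace_quantum_references_py_alt (content : String) : String :=
  String.ofList (pvScanB content.toList)

-- ===== PRECONDITION & SPEC =====
def Spec_replace_quantum_references_py (content : String) (out : String) : Prop := out = replace_quantum_references_py_alt content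
instance (content : String) (out : String) : Decidable (Spec_replace_quantum_references_py content out) := by unfold Spec_replace_quantum_references_py; infer_instance

-- ===== CLAIM (what is proved, stated in full; the proofs are below) =====
def Claim_equal_replace_quantum_references_py : Prop := ∀ (content : String), Dom_replace_quantum_references_py content → Spec_replace_quantum_references_py content (replace_quantum_references_py content)

-- ===== LEMMAS AND PROOFS =====

-- single-pattern leftmost non-overlapping replacement, pattern a :: p (nonempty)
def pvRep1 (a : Char) (p r : List Char) : List Char → List Char
  | [] => []
  | c :: t =>
    if (a :: p).isPrefixOf (c :: t) then r ++ pvRep1 a p r (t.drop p.length)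
    else c :: pvRep1 a p r t
termination_by l => l.length
decreasing_by all_goals (simp [List.length_drop]; try omega)

theorem pvGo_eq (a : Char) (p r : List Char) :
    ∀ (fuel : Nat) (l acc : List Char), l.length ≤ fuel →
      PySem.Chars.replace.go (a :: p) r fuel l acc = acc.reverse ++ pvRep1 a p r l := by
  intro fuel
  induction fuel with
  | zero =>
    intro l acc h
    have : l = [] := List.eq_nil_of_length_eq_zero (Nat.le_zero.mp h)
    subst this
    rw [PySem.Chars.replace.go.eq_def]
    simp [pvRep1]
  | succ n ih =>
    intro l acc h
    match l with
    | [] =>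
      rw [PySem.Chars.replace.go.eq_def]
      simp [pvRep1]
    | c :: t =>
      rw [PySem.Chars.replace.go.eq_def]
      by_cases hp : (a :: p).isPrefixOf (c :: t)
      · simp only [if_pos hp]
        have hlen : (List.drop (a :: p).length (c :: t)).length ≤ n := by
          simp only [List.length_cons] at h
          simp [List.length_drop]; omega
        rw [ih _ _ hlen]
        simp only [List.length_cons, List.drop_succ_cons]
        rw [pvRep1, if_pos hp]
        simp
      · simp only [if_neg hp]
        have hlen : t.length ≤ n := by simp at h; omega
        rw [ih _ _ hlen]
        rw [pvRep1, if_neg hp]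
        simp

theorem pvReplace_eq (s : List Char) (a : Char) (p r : List Char) :
    PySem.Chars.replace s (a :: p) r = pvRep1 a p r s := by
  rw [PySem.Chars.replace]
  simp only [List.isEmpty_cons, Bool.false_eq_true, if_false]
  rw [pvGo_eq a p r s.length s [] le_rfl]
  simp

theorem pvRep1_skip (a : Char) (p r : List Char) (c : Char) (t : List Char)
    (h : ¬ (a :: p).isPrefixOf (c :: t) = true) :
    pvRep1 a p r (c :: t) = c :: pvRep1 a p r t := by
  rw [pvRep1, if_neg h]

theorem pvRep1_match (a : Char) (p r : List Char) (c : Char) (t : List Char)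
    (h : (a :: p).isPrefixOf (c :: t) = true) :
    pvRep1 a p r (c :: t) = r ++ pvRep1 a p r (t.drop p.length) := by
  rw [pvRep1, if_pos h]

-- a block of characters none of which starts the pattern passes through unchanged
theorem pvRep1_commute (a : Char) (p r : List Char) :
    ∀ (pre X : List Char), pre.all (fun x => x != a) = true →
      pvRep1 a p r (pre ++ X) = pre ++ pvRep1 a p r X := by
  intro pre
  induction pre with
  | nil => intro X _; simp
  | cons b pre' ih =>
    intro X hb
    simp only [List.all_cons, Bool.and_eq_true, bne_iff_ne] at hb
    have hnp : ¬ (a :: p).isPrefixOf (b :: (pre' ++ X)) = true := by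
      simp only [List.isPrefixOf, Bool.and_eq_true, beq_iff_eq]
      intro hc
      exact hb.1 hc.1.symm
    rw [List.cons_append, pvRep1_skip _ _ _ _ _ hnp,
        ih X (by simpa using hb.2)]
    simp

-- if the replacement's first character never occurs in w, a w-prefix of the output
-- was already a w-prefix of the input
theorem pvProtect (a : Char) (p : List Char) (h : Char) (r' : List Char) :
    ∀ (n : Nat) (t : List Char), t.length ≤ n → ∀ w : List Char, h ∉ w →
      w.isPrefixOf (pvRep1 a p (h :: r') t) = true → w.isPrefixOf t = true := by
  intro n
  induction n with
  | zero =>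
    intro t ht w _ hw
    have : t = [] := List.eq_nil_of_length_eq_zero (Nat.le_zero.mp ht)
    subst this
    simpa [pvRep1] using hw
  | succ m ih =>
    intro t ht w hmem hw
    match t with
    | [] => simpa [pvRep1] using hw
    | c :: t' =>
      by_cases hp : (a :: p).isPrefixOf (c :: t')
      · rw [pvRep1_match _ _ _ _ _ hp] at hw
        match w with
        | [] => simp [List.isPrefixOf]
        | x :: w' =>
          exfalso
          simp only [List.cons_append, List.isPrefixOf, Bool.and_eq_true, beq_iff_eq] at hw
          exact hmem (by simp [hw.1])
      · rw [pvRep1_skip _ _ _ _ _ hp] at hw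
        match w with
        | [] => simp [List.isPrefixOf]
        | x :: w' =>
          simp only [List.isPrefixOf, Bool.and_eq_true, beq_iff_eq] at hw ⊢
          refine ⟨hw.1, ?_⟩
          have ht' : t'.length ≤ m := by simp at ht; omega
          exact ih t' ht' w' (fun hc => hmem (by simp [hc])) hw.2

-- unfolding lemma for B's scan at a nonempty list
theorem pvScanB_cons (c : Char) (t : List Char) :
    pvScanB (c :: t) =
      (if "Quantum".toList.isPrefixOf (c :: t) then "SutazAi".toList ++ pvScanB (t.drop 6)
      else if "quantum".toList.isPrefixOf (c :: t) then "sutazai".toList ++ pvScanB (t.drop 6)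
      else if "QUANTUM".toList.isPrefixOf (c :: t) then "SUTAZAI".toList ++ pvScanB (t.drop 6)
      else c :: pvScanB t) := by
  rw [pvScanB.eq_def]

-- the composition of A's three passes equals B's single scan
theorem pvMain : ∀ (n : Nat) (s : List Char), s.length ≤ n →
    pvRep1 'Q' "UANTUM".toList "SUTAZAI".toList
      (pvRep1 'q' "uantum".toList "sutazai".toList
        (pvRep1 'Q' "uantum".toList "SutazAi".toList s)) = pvScanB s := by
  intro n
  induction n with
  | zero =>
    intro s hs
    have : s = [] := List.eq_nil_of_length_eq_zero (Nat.le_zero.mp hs)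
    subst this
    simp [pvRep1, pvScanB]
  | succ m ih =>
    intro s hs
    match s with
    | [] => simp [pvRep1, pvScanB]
    | c :: t =>
      by_cases h1 : "Quantum".toList.isPrefixOf (c :: t)
      · -- s = "Quantum" ++ X
        obtain ⟨X, hX⟩ := List.isPrefixOf_iff_prefix.mp h1
        have h' : c :: t = 'Q' :: ("uantum".toList ++ X) := by rw [← hX]; simp
        obtain ⟨hc, ht⟩ := List.cons_eq_cons.mp h'
        subst hc; subst ht
        have hXlen : X.length ≤ m := by simp at hs; omega
        have hdrop : ("uantum".toList ++ X).drop 6 = X := by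
          simp
        rw [pvScanB_cons, if_pos h1, hdrop]
        rw [pvRep1_match 'Q' "uantum".toList "SutazAi".toList 'Q' _
              (by rw [List.isPrefixOf_iff_prefix]; exact ⟨X, by simp⟩)]
        rw [List.drop_left]
        rw [pvRep1_commute 'q' _ _ "SutazAi".toList _ (by decide)]
        rw [pvRep1_commute 'Q' _ _ "SutazAi".toList _ (by decide)]
        rw [ih X hXlen]
      by_cases h2 : "quantum".toList.isPrefixOf (c :: t)
      · -- s = "quantum" ++ X
        obtain ⟨X, hX⟩ := List.isPrefixOf_iff_prefix.mp h2
        have h' : c :: t = 'q' :: ("uantum".toList ++ X) := by rw [← hX]; simp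
        obtain ⟨hc, ht⟩ := List.cons_eq_cons.mp h'
        subst hc; subst ht
        have hXlen : X.length ≤ m := by simp at hs; omega
        have hdrop : ("uantum".toList ++ X).drop 6 = X := by
          simp
        rw [pvScanB_cons, if_neg h1, if_pos h2, hdrop]
        have e1 : ('q' : Char) :: ("uantum".toList ++ X) = "quantum".toList ++ X := rfl
        conv_lhs => rw [e1]
        rw [pvRep1_commute 'Q' _ _ "quantum".toList X (by decide)]
        have e2 : "quantum".toList ++ pvRep1 'Q' "uantum".toList "SutazAi".toList X
            = 'q' :: ("uantum".toList ++ pvRep1 'Q' "uantum".toList "SutazAi".toList X) := rfl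
        rw [e2, pvRep1_match 'q' "uantum".toList "sutazai".toList _ _
              (by rw [List.isPrefixOf_iff_prefix]
                  exact ⟨pvRep1 'Q' "uantum".toList "SutazAi".toList X, by simp⟩)]
        rw [List.drop_left]
        rw [pvRep1_commute 'Q' _ _ "sutazai".toList _ (by decide)]
        rw [ih X hXlen]
      by_cases h3 : "QUANTUM".toList.isPrefixOf (c :: t)
      · -- s = "QUANTUM" ++ X
        obtain ⟨X, hX⟩ := List.isPrefixOf_iff_prefix.mp h3
        have h' : c :: t = 'Q' :: ("UANTUM".toList ++ X) := by rw [← hX]; simp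
        obtain ⟨hc, ht⟩ := List.cons_eq_cons.mp h'
        subst hc; subst ht
        have hXlen : X.length ≤ m := by simp at hs; omega
        have hdrop : ("UANTUM".toList ++ X).drop 6 = X := by
          simp
        rw [pvScanB_cons, if_neg h1, if_neg h2, if_pos h3, hdrop]
        rw [pvRep1_skip 'Q' "uantum".toList "SutazAi".toList 'Q' _ (by exact h1)]
        rw [pvRep1_commute 'Q' _ _ "UANTUM".toList X (by decide)]
        have e1 : ('Q' : Char) :: ("UANTUM".toList ++ pvRep1 'Q' "uantum".toList "SutazAi".toList X)
            = "QUANTUM".toList ++ pvRep1 'Q' "uantum".toList "SutazAi".toList X := rfl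
        rw [e1, pvRep1_commute 'q' _ _ "QUANTUM".toList _ (by decide)]
        have e2 : "QUANTUM".toList ++
              pvRep1 'q' "uantum".toList "sutazai".toList
                (pvRep1 'Q' "uantum".toList "SutazAi".toList X)
            = 'Q' :: ("UANTUM".toList ++
              pvRep1 'q' "uantum".toList "sutazai".toList
                (pvRep1 'Q' "uantum".toList "SutazAi".toList X)) := rfl
        rw [e2, pvRep1_match 'Q' "UANTUM".toList "SUTAZAI".toList _ _
              (by rw [List.isPrefixOf_iff_prefix]
                  exact ⟨pvRep1 'q' "uantum".toList "sutazai".toList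
                    (pvRep1 'Q' "uantum".toList "SutazAi".toList X), by simp⟩)]
        rw [List.drop_left]
        rw [ih X hXlen]
      · -- none of the three patterns starts here: all passes copy c
        have htlen : t.length ≤ m := by simp at hs; omega
        rw [pvScanB_cons, if_neg h1, if_neg h2, if_neg h3]
        rw [pvRep1_skip 'Q' "uantum".toList "SutazAi".toList c t (by exact h1)]
        have hn2 : ¬ ('q' :: "uantum".toList).isPrefixOf
            (c :: pvRep1 'Q' "uantum".toList "SutazAi".toList t) = true := by
          intro hcontra
          simp only [List.isPrefixOf, Bool.and_eq_true, beq_iff_eq] at hcontra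
          have hu : "uantum".toList.isPrefixOf t = true :=
            pvProtect 'Q' "uantum".toList 'S' "utazAi".toList t.length t le_rfl
              "uantum".toList (by decide) hcontra.2
          apply h2
          simp only [show "quantum".toList = 'q' :: "uantum".toList from rfl,
            List.isPrefixOf, Bool.and_eq_true, beq_iff_eq]
          exact ⟨hcontra.1, hu⟩
        rw [pvRep1_skip 'q' "uantum".toList "sutazai".toList c _ hn2]
        have hn3 : ¬ ('Q' :: "UANTUM".toList).isPrefixOf
            (c :: pvRep1 'q' "uantum".toList "sutazai".toList
              (pvRep1 'Q' "uantum".toList "SutazAi".toList t)) = true := by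
          intro hcontra
          simp only [List.isPrefixOf, Bool.and_eq_true, beq_iff_eq] at hcontra
          have hu1 : "UANTUM".toList.isPrefixOf
              (pvRep1 'Q' "uantum".toList "SutazAi".toList t) = true :=
            pvProtect 'q' "uantum".toList 's' "utazai".toList _ _ le_rfl
              "UANTUM".toList (by decide) hcontra.2
          have hu2 : "UANTUM".toList.isPrefixOf t = true :=
            pvProtect 'Q' "uantum".toList 'S' "utazAi".toList t.length t le_rfl
              "UANTUM".toList (by decide) hu1
          apply h3
          simp only [show "QUANTUM".toList = 'Q' :: "UANTUM".toList from rfl,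
            List.isPrefixOf, Bool.and_eq_true, beq_iff_eq]
          exact ⟨hcontra.1, hu2⟩
        rw [pvRep1_skip 'Q' "UANTUM".toList "SUTAZAI".toList c _ hn3]
        rw [ih t htlen]

-- ===== VERDICT (by name: the statement is the Claim_ definition above) =====
theorem replace_quantum_references_py_spec : Claim_equal_replace_quantum_references_py := by
  intro content _
  show replace_quantum_references_py content = replace_quantum_references_py_alt content
  unfold replace_quantum_references_py replace_quantum_references_py_alt
  simp only [List.foldl]
  show String.ofList (PySem.Chars.replace
      (String.ofList (PySem.Chars.replace
        (String.ofList (PySem.Chars.replace content.toList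
          ('Q' :: "uantum".toList) "SutazAi".toList)).toList
        ('q' :: "uantum".toList) "sutazai".toList)).toList
      ('Q' :: "UANTUM".toList) "SUTAZAI".toList)
    = String.ofList (pvScanB content.toList)
  rw [String.toList_ofList, String.toList_ofList]
  rw [pvReplace_eq, pvReplace_eq, pvReplace_eq]
  rw [pvMain content.toList.length content.toList le_rfl]
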